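-- pv_equiv track=rewrite | github.com/ChamiLamelas/Tufts-CS137-FinalProject | src/trees.py | build_edge_map
-- ===== SOURCE A (Python) =====
-- def build_edge_map(max_num_nodes=10):
--     edge_map = dict()
--     k = 0
--     for i in range(max_num_nodes):
--         for j in range(i + 1, max_num_nodes):
--             edge_map[(i, j)] = k
--             k += 1
--     return edge_map
-- ===== SOURCE B (Python) =====
-- def build_edge_map(max_num_nodes=10):
--     # each pair (i, j) gets its index by a closed-form triangular offset,
--     # no running counter needed
--     return {(i, j): i * (2 * max_num_nodes - i - 1) // 2 + (j - i - 1)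
--             for i in range(max_num_nodes)
--             for j in range(i + 1, max_num_nodes)}
-- ===== Notes on version B (the rewrite author's own statement) =====
-- stated objective: alternative
-- what changed: Replaces the running counter k threaded through A's nested loops by a dict comprehension that computes each edge index independently from its pair via a closed-form triangular offset.
import Mathlib
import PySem

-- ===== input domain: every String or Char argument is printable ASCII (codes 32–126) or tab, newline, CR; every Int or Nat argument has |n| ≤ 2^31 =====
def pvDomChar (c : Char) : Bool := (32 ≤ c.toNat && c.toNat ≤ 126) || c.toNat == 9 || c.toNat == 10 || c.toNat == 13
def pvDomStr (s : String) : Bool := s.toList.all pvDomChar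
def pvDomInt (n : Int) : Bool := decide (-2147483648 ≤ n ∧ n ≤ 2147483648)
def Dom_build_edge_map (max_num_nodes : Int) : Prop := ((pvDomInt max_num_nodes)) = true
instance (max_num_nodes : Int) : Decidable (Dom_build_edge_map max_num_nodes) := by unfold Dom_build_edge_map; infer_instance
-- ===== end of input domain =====

-- B replaces A's running counter by a closed-form triangular index formula (alternative decomposition, same cost).
-- ===== PORT A =====
-- Python dict entry ((i, j), k) is written flattened as (i, j, k); all keys (i, j) here are
-- distinct, so each dict assignment inserts a fresh key, i.e. appends — exact for insertion order.
def build_edge_map (max_num_nodes : Int) : List (Int × Int × Int) :=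
  ((PySem.List.pyRange 0 max_num_nodes 1).foldl
    (fun st i =>
      (PySem.List.pyRange (i + 1) max_num_nodes 1).foldl
        (fun st j => (st.1 ++ [(i, j, st.2)], st.2 + 1)) st)
    (([] : List (Int × Int × Int)), (0 : Int))).1

-- ===== PORT B =====
def build_edge_map_alt (max_num_nodes : Int) : List (Int × Int × Int) :=
  (PySem.List.pyRange 0 max_num_nodes 1).flatMap (fun i =>
    (PySem.List.pyRange (i + 1) max_num_nodes 1).map (fun j =>
      (i, j, PySem.Int.floordiv (i * (2 * max_num_nodes - i - 1)) 2 + (j - i - 1))))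

-- ===== PRECONDITION & SPEC =====
def Spec_build_edge_map (max_num_nodes : Int) (out : List (Int × Int × Int)) : Prop := out = build_edge_map_alt max_num_nodes
instance (max_num_nodes : Int) (out : List (Int × Int × Int)) : Decidable (Spec_build_edge_map max_num_nodes out) := by unfold Spec_build_edge_map; infer_instance

-- ===== CLAIM (what is proved, stated in full; the proofs are below) =====
def Claim_equal_build_edge_map : Prop := ∀ (max_num_nodes : Int), Dom_build_edge_map max_num_nodes → Spec_build_edge_map max_num_nodes (build_edge_map max_num_nodes)

-- ===== LEMMAS AND PROOFS =====

theorem pv_inner (i n' : Int) : ∀ (m : Nat) (a : Int) (acc : List (Int × Int × Int)) (k : Int),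
    (n' - a).toNat = m →
    (PySem.List.pyRange a n' 1).foldl
      (fun st j => (st.1 ++ [(i, j, st.2)], st.2 + 1)) (acc, k)
    = (acc ++ (PySem.List.pyRange a n' 1).map (fun j => (i, j, k + (j - a))),
       k + ((n' - a).toNat : Int)) := by
  intro m
  induction m with
  | zero =>
    intro a acc k hm
    have he : PySem.List.pyRange a n' 1 = [] := by
      rw [PySem.List.pyRange_one]; simp [hm]
    simp [he, hm]
  | succ m ih =>
    intro a acc k hm
    have hab : a < n' := by omega
    rw [PySem.List.pyRange_one_cons hab]
    simp only [List.foldl_cons, List.map_cons]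
    rw [ih (a + 1) (acc ++ [(i, a, k)]) (k + 1) (by omega)]
    apply Prod.ext
    · simp only [List.append_assoc, List.cons_append, List.nil_append]
      congr 2
      · simp
      · apply List.map_congr_left
        intro j hj
        have := (PySem.List.mem_pyRange_one).1 hj
        simp only [Prod.mk.injEq]
        refine ⟨trivial, trivial, by omega⟩
    · simp only []; omega

theorem pv_outer (n : Int) : ∀ (m : Nat) (a : Int) (acc : List (Int × Int × Int)),
    0 ≤ a → a ≤ n → (n - a).toNat = m →
    (PySem.List.pyRange a n 1).foldl
      (fun st i => (PySem.List.pyRange (i + 1) n 1).foldl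
        (fun st j => (st.1 ++ [(i, j, st.2)], st.2 + 1)) st)
      (acc, PySem.Int.floordiv (a * (2 * n - a - 1)) 2)
    = (acc ++ (PySem.List.pyRange a n 1).flatMap (fun i =>
        (PySem.List.pyRange (i + 1) n 1).map (fun j =>
          (i, j, PySem.Int.floordiv (i * (2 * n - i - 1)) 2 + (j - i - 1)))),
       PySem.Int.floordiv (n * (2 * n - n - 1)) 2) := by
  intro m
  induction m with
  | zero =>
    intro a acc _ _ hm
    have ha : a = n := by omega
    subst ha
    have he : PySem.List.pyRange a a 1 = [] := by
      rw [PySem.List.pyRange_one]; simp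
    simp [he]
  | succ m ih =>
    intro a acc ha0 han hm
    have hab : a < n := by omega
    rw [PySem.List.pyRange_one_cons hab]
    simp only [List.foldl_cons, List.flatMap_cons]
    rw [pv_inner a n ((n - (a + 1)).toNat) (a + 1) acc (PySem.Int.floordiv (a * (2 * n - a - 1)) 2) rfl]
    have hoff : PySem.Int.floordiv (a * (2 * n - a - 1)) 2 + (((n - (a + 1)).toNat : Nat) : Int)
        = PySem.Int.floordiv ((a + 1) * (2 * n - (a + 1) - 1)) 2 := by
      rw [PySem.Int.floordiv_eq_ediv_of_pos (by omega),
          PySem.Int.floordiv_eq_ediv_of_pos (by omega)]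
      have hpq : (a + 1) * (2 * n - (a + 1) - 1) = a * (2 * n - a - 1) + 2 * (n - a - 1) := by ring
      rw [hpq]
      omega
    rw [hoff,
        ih (a + 1) (acc ++ (PySem.List.pyRange (a + 1) n 1).map
          (fun j => (a, j, PySem.Int.floordiv (a * (2 * n - a - 1)) 2 + (j - (a + 1)))))
          (by omega) (by omega) (by omega)]
    rw [List.append_assoc]
    congr 3
    apply List.map_congr_left
    intro j hj
    simp only [Prod.mk.injEq]
    refine ⟨trivial, trivial, by omega⟩


-- ===== VERDICT (by name: the statement is the Claim_ definition above) =====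
theorem build_edge_map_spec : Claim_equal_build_edge_map := by
  intro n _
  unfold Spec_build_edge_map build_edge_map build_edge_map_alt
  by_cases hn : 0 ≤ n
  · have h0 : PySem.Int.floordiv (0 * (2 * n - 0 - 1)) 2 = (0 : Int) := by
      rw [PySem.Int.floordiv_eq_ediv_of_pos (by omega)]; simp
    have h := pv_outer n n.toNat 0 [] (le_refl 0) hn (by omega)
    rw [h0] at h
    rw [h]
    simp
  · have he : PySem.List.pyRange 0 n 1 = [] := by
      rw [PySem.List.pyRange_one]
      simp
      omega
    simp [he]
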